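-- pv_equiv track=rewrite | github.com/piotrhelm/NESTFUL | data_v2/executable_functions/py_code_file_3702.py | find_substring_positions
-- ===== SOURCE A (Python) =====
-- from typing import List, Tuple
--
-- def find_substring_positions(string: str, substring: str) -> List[Tuple[int, int]]:
--
--     """
--
--     Converts a code snippet into a list of line numbers and column numbers where the given string appears.
--
--     Each element of the returned list is a tuple consisting of the line number and column number within the string
--
--     where the given substring is found.
--
--
--
--     Args:
--
--         string: The code snippet to search.
--
--         substring: The substring to find within the code snippet.
--
--
--
--     Returns:
--
--         A list of tuples, where each tuple contains the line number and column number where the substring is found.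
--
--     """
--
--     result = []
--
--     line = 1
--
--     column = 1
--
--
--
--     for char in string:
--
--         if char == '\n':
--
--             line += 1
--
--             column = 1
--
--         elif char == substring:
--
--             result.append((line, column))
--
--         else:
--
--             column += 1
--
--
--
--     return result
-- ===== SOURCE B (Python) =====
-- def find_substring_positions(string, substring):
--     result = []
--     for line_no, line in enumerate(string.split('\n'), start=1):
--         column = 1
--         for char in line:
--             if char == substring:
--                 result.append((line_no, column))
--             else:
--                 column += 1
--     return result
-- ===== Notes on version B (the rewrite author's own statement) =====
-- stated objective: simpler
-- what changed: Replaces the flat one-pass scan with explicit line/column counters by split('\n') followed by enumerate over lines with a fresh per-line column counter, preserving the no-increment-on-match behaviour.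
import Mathlib
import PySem

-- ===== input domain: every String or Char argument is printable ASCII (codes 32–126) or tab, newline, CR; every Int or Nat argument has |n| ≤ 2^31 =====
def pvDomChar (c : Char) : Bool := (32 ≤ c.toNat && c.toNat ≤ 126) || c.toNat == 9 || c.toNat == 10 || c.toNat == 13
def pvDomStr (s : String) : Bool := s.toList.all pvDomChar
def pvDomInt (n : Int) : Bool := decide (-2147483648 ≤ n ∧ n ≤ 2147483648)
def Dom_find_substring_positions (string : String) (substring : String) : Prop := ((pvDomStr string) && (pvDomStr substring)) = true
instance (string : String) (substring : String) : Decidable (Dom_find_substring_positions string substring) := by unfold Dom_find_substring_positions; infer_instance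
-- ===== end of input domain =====

-- B splits on '\n' and scans each line with a fresh column counter instead of A's
-- single flat scan; same return value, objective: simpler decomposition.

-- ===== PORT A =====
-- one flat pass; state = (result, line, column); 'char == substring' ports as [c] = substring.toList
def find_substring_positions (string : String) (substring : String) : List (Int × Int) :=
  (string.toList.foldl
    (fun (st : List (Int × Int) × Int × Int) c =>
      if c = '\n' then (st.1, st.2.1 + 1, 1)
      else if [c] = substring.toList then (st.1 ++ [(st.2.1, st.2.2)], st.2.1, st.2.2)
      else (st.1, st.2.1, st.2.2 + 1))
    ([], 1, 1)).1

-- ===== PORT B =====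
-- inner loop of Source B: scan one line (column starts at 1, not incremented on a match)
def pvScanLine (sub : List Char) (lineNo : Int) (line : List Char) : List (Int × Int) :=
  (line.foldl
    (fun (st : List (Int × Int) × Int) c =>
      if [c] = sub then (st.1 ++ [(lineNo, st.2)], st.2)
      else (st.1, st.2 + 1))
    ([], 1)).1

-- string.split('\n') → PySem.Chars.splitOn; enumerate(lines, start=1) → fold with a line counter
def find_substring_positions_alt (string : String) (substring : String) : List (Int × Int) :=
  ((PySem.Chars.splitOn string.toList ['\n']).foldl
    (fun (st : List (Int × Int) × Int) l =>
      (st.1 ++ pvScanLine substring.toList st.2 l, st.2 + 1))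
    ([], 1)).1

-- ===== PRECONDITION & SPEC =====
def Spec_find_substring_positions (string : String) (substring : String) (out : List (Int × Int)) : Prop := out = find_substring_positions_alt string substring
instance (string : String) (substring : String) (out : List (Int × Int)) : Decidable (Spec_find_substring_positions string substring out) := by unfold Spec_find_substring_positions; infer_instance

-- ===== CLAIM (what is proved, stated in full; the proofs are below) =====
def Claim_equal_find_substring_positions : Prop := ∀ (string : String) (substring : String), Dom_find_substring_positions string substring → Spec_find_substring_positions string substring (find_substring_positions string substring)

-- ===== LEMMAS AND PROOFS =====

-- recursive form of A's loop (result passed down the recursion)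
def pvGoA (sub : List Char) : List Char → Int → Int → List (Int × Int)
  | [], _, _ => []
  | c :: cs, ln, col =>
    if c = '\n' then pvGoA sub cs (ln + 1) 1
    else if [c] = sub then (ln, col) :: pvGoA sub cs ln col
    else pvGoA sub cs ln (col + 1)

-- recursive form of B's inner loop
def pvLineGo (sub : List Char) (ln : Int) : List Char → Int → List (Int × Int)
  | [], _ => []
  | c :: cs, col =>
    if [c] = sub then (ln, col) :: pvLineGo sub ln cs col
    else pvLineGo sub ln cs (col + 1)

-- recursive form of B's outer loop
def pvLinesGo (sub : List Char) : List (List Char) → Int → List (Int × Int)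
  | [], _ => []
  | l :: ls, ln => pvLineGo sub ln l 1 ++ pvLinesGo sub ls (ln + 1)

-- structural split on '\n'
def pvSplit : List Char → List (List Char)
  | [] => [[]]
  | c :: cs => if c = '\n' then [] :: pvSplit cs
               else ((pvSplit cs).headI.cons c) :: (pvSplit cs).tail

lemma pvSplit_ne_nil (cs : List Char) : pvSplit cs ≠ [] := by
  cases cs with
  | nil => simp [pvSplit]
  | cons c cs => simp only [pvSplit]; split <;> simp

lemma pvSplit_cons_headI_tail (cs : List Char) :
    pvSplit cs = (pvSplit cs).headI :: (pvSplit cs).tail := by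
  cases h : pvSplit cs with
  | nil => exact absurd h (pvSplit_ne_nil cs)
  | cons a l => simp

-- PySem.Chars.splitOn.go with sep = ['\n'] computes pvSplit
lemma splitOn_go_newline (fuel : Nat) :
    ∀ (l cur : List Char) (acc : List (List Char)), l.length < fuel →
      PySem.Chars.splitOn.go ['\n'] fuel l cur acc =
        acc.reverse ++ (cur.reverse ++ (pvSplit l).headI) :: (pvSplit l).tail := by
  induction fuel with
  | zero => intro l cur acc h; omega
  | succ f ih =>
    intro l cur acc h
    cases l with
    | nil => simp [PySem.Chars.splitOn.go, pvSplit]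
    | cons c rest =>
      by_cases hc : c = '\n'
      · subst hc
        have hpre : List.isPrefixOf ['\n'] ('\n' :: rest) = true := by simp [List.isPrefixOf]
        rw [PySem.Chars.splitOn.go, if_pos hpre]
        rw [show (List.drop (['\n'] : List Char).length ('\n' :: rest)) = rest from rfl]
        rw [ih rest [] (cur.reverse :: acc) (by simpa using Nat.lt_of_succ_lt_succ h)]
        simp [pvSplit]
        exact (pvSplit_cons_headI_tail rest).symm
      · have hpre : List.isPrefixOf ['\n'] (c :: rest) = false := by
          simp only [List.isPrefixOf, List.isPrefixOf_nil_left, Bool.and_true]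
          exact beq_false_of_ne (fun hh => hc (Eq.symm hh))
        rw [PySem.Chars.splitOn.go, if_neg (by simp [hpre])]
        rw [ih rest (c :: cur) acc (by simpa using Nat.lt_of_succ_lt_succ h)]
        simp only [pvSplit, if_neg hc]
        rw [pvSplit_cons_headI_tail rest]
        simp
lemma splitOn_newline (cs : List Char) :
    PySem.Chars.splitOn cs ['\n'] = pvSplit cs := by
  rw [PySem.Chars.splitOn, splitOn_go_newline (cs.length + 1) cs [] [] (by omega)]
  simpa using (pvSplit_cons_headI_tail cs).symm

-- A's fold = pvGoA with the accumulated result in front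
lemma foldA_eq (sub : List Char) :
    ∀ (cs : List Char) (res : List (Int × Int)) (ln col : Int),
      (cs.foldl
        (fun (st : List (Int × Int) × Int × Int) c =>
          if c = '\n' then (st.1, st.2.1 + 1, 1)
          else if [c] = sub then (st.1 ++ [(st.2.1, st.2.2)], st.2.1, st.2.2)
          else (st.1, st.2.1, st.2.2 + 1))
        (res, ln, col)).1 = res ++ pvGoA sub cs ln col := by
  intro cs
  induction cs with
  | nil => intro res ln col; simp [pvGoA]
  | cons c cs ih =>
    intro res ln col
    simp only [List.foldl_cons, pvGoA]
    by_cases h1 : c = '\n'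
    · simp [h1, ih]
    · by_cases h2 : [c] = sub
      · simp [h1, h2, ih]
      · simp [h1, h2, ih]

-- B's inner fold = pvLineGo
lemma foldLine_eq (sub : List Char) (ln : Int) :
    ∀ (cs : List Char) (res : List (Int × Int)) (col : Int),
      (cs.foldl
        (fun (st : List (Int × Int) × Int) c =>
          if [c] = sub then (st.1 ++ [(ln, st.2)], st.2)
          else (st.1, st.2 + 1))
        (res, col)).1 = res ++ pvLineGo sub ln cs col := by
  intro cs
  induction cs with
  | nil => intro res col; simp [pvLineGo]
  | cons c cs ih =>
    intro res col
    simp only [List.foldl_cons, pvLineGo]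
    by_cases h : [c] = sub
    · simp [h, ih]
    · simp [h, ih]

lemma pvScanLine_eq (sub : List Char) (ln : Int) (l : List Char) :
    pvScanLine sub ln l = pvLineGo sub ln l 1 := by
  simpa [pvScanLine] using foldLine_eq sub ln l [] 1

-- B's outer fold = pvLinesGo
lemma foldLines_eq (sub : List Char) :
    ∀ (ls : List (List Char)) (res : List (Int × Int)) (ln : Int),
      (ls.foldl
        (fun (st : List (Int × Int) × Int) l =>
          (st.1 ++ pvScanLine sub st.2 l, st.2 + 1))
        (res, ln)).1 = res ++ pvLinesGo sub ls ln := by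
  intro ls
  induction ls with
  | nil => intro res ln; simp [pvLinesGo]
  | cons l ls ih =>
    intro res ln
    simp only [List.foldl_cons]
    rw [ih]
    simp [pvLinesGo, pvScanLine_eq, List.append_assoc]

-- the heart: A's flat scan equals scanning the split lines
lemma goA_split (sub : List Char) :
    ∀ (cs : List Char) (ln col : Int),
      pvGoA sub cs ln col =
        pvLineGo sub ln ((pvSplit cs).headI) col ++ pvLinesGo sub ((pvSplit cs).tail) (ln + 1) := by
  intro cs
  induction cs with
  | nil => intro ln col; simp [pvGoA, pvSplit, pvLineGo, pvLinesGo]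
  | cons c cs ih =>
    intro ln col
    by_cases h1 : c = '\n'
    · subst h1
      simp only [pvGoA, if_pos rfl, pvSplit, if_pos rfl, List.headI, List.tail]
      rw [ih (ln + 1) 1]
      rw [pvSplit_cons_headI_tail cs]
      simp [pvLineGo, pvLinesGo]
    · simp only [pvGoA, if_neg h1, pvSplit, if_neg h1, List.headI, List.tail, List.cons_append]
      by_cases h2 : [c] = sub
      · rw [if_pos h2, ih ln col]
        simp only [pvLineGo, if_pos h2, List.cons_append]
        rfl
      · rw [if_neg h2, ih ln (col + 1)]
        simp only [pvLineGo, if_neg h2]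
        rfl

-- ===== VERDICT (by name: the statement is the Claim_ definition above) =====
theorem find_substring_positions_spec : Claim_equal_find_substring_positions := by
  intro string substring _
  show find_substring_positions string substring = find_substring_positions_alt string substring
  rw [find_substring_positions, find_substring_positions_alt,
    foldA_eq substring.toList string.toList [] 1 1,
    foldLines_eq substring.toList (PySem.Chars.splitOn string.toList ['\n']) [] 1,
    splitOn_newline, goA_split]
  rw [pvSplit_cons_headI_tail string.toList]
  simp [pvLinesGo]
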